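-- pv_equiv track=rewrite | github.com/bssrdf/pyleet | P/PrimeFactorStatistics.py | Count_PrimeNum
-- ===== SOURCE A (Python) =====
-- def Count_PrimeNum(N):
--     # 解题思路利用一个递推的思路，例如40 = 4*10 ,那么40的质数分解个数等于4的质数分解
--     # 个数加上10的质数分解个数。开一个数组prime，prime[i]代表i的质数分解个数；
--     # 当遍历到i时，所有小于等于i的prime值均已得到，故可得到所以i*j的prime值（1<j<i）复杂度分析
--     #
--     ans = 0
--     vis = [False]*100005
--     prime = [1]*100005
--     for i in range(2,N+1):
--         ans += prime[i]
--         k = min(N//i,i)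
--         for j in range(2,k+1):
--             if vis[i*j]:
--                 continue
--             vis[i*j] = True
--             prime[i*j] = prime[i] + prime[j]
--     return ans
-- ===== SOURCE B (Python) =====
-- def Count_PrimeNum(N):
--     # Sum of Omega(i) (prime factors with multiplicity) for i = 2..N,
--     # by trial-dividing each i independently -- no sieve arrays.
--     ans = 0
--     for i in range(2, N + 1):
--         m = i
--         d = 2
--         while d * d <= m:
--             if m % d == 0:
--                 ans += 1
--                 m //= d
--             else:
--                 d += 1
--         if m > 1:
--             ans += 1
--     return ans
-- ===== Notes on version B (the rewrite author's own statement) =====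
-- stated objective: simpler
-- what changed: Replaces the 100005-entry vis/prime sieve DP (which propagates factor counts to composites i*j) by independent trial-division factorisation of each i in 2..N, summing the factor counts directly with no arrays.
-- outside the precondition, e.g. on Count_PrimeNum(100005): A raises IndexError, B returns 343629
import Mathlib
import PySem

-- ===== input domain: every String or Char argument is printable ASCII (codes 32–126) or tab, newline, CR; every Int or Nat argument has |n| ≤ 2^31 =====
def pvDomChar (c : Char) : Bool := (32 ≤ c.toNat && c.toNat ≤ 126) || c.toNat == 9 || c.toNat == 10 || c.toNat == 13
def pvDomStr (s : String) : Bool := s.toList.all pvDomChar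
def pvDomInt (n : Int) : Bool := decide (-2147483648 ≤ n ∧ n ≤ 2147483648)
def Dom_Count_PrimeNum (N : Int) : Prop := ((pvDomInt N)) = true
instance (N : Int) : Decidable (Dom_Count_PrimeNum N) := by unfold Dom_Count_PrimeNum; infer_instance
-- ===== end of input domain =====

-- B replaces A's 100005-entry vis/prime sieve DP by independent trial-division
-- factorisation of each i in 2..N (objective: simpler; not faster). Equivalence is
-- about the return value; neither version mutates its argument.

-- ===== PORT A =====
-- literal transliteration of A; the two loop bodies are named helpers, and the two
-- Python lists are Arrays (O(1) indexing, matching Python's lists). All reads/writes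
-- use nonnegative indices that are in range under Pre_, where getD/setIfInBounds are
-- exact for Python's xs[t] / xs[t] = v (outside Pre_ Python raises IndexError).
def aInner (i : Int) (vp : Array Bool × Array Int) (j : Int) : Array Bool × Array Int :=
  let (vis, prime) := vp
  if vis.getD (i * j).toNat false then (vis, prime)
  else
    let w := prime.getD i.toNat 0 + prime.getD j.toNat 0
    (vis.setIfInBounds (i * j).toNat true, prime.setIfInBounds (i * j).toNat w)

def aOuter (N : Int) (st : Int × Array Bool × Array Int) (i : Int) : Int × Array Bool × Array Int :=
  let (ans, vis, prime) := st
  let ans := ans + prime.getD i.toNat 0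
  let k := min (PySem.Int.floordiv N i) i
  let (vis, prime) := (PySem.List.pyRange 2 (k + 1) 1).foldl (aInner i) (vis, prime)
  (ans, vis, prime)

def Count_PrimeNum (N : Int) : Int :=
  let ans : Int := 0
  let vis : Array Bool := Array.replicate 100005 false
  let prime : Array Int := Array.replicate 100005 1
  ((PySem.List.pyRange 2 (N + 1) 1).foldl (aOuter N) (ans, vis, prime)).1

-- ===== PORT B =====
-- bTrial is Source B's inner `while d*d <= m` loop; it returns the final (m, d, ans).
-- The `2 ≤ d` conjunct is a totality guard only (d starts at 2 and never shrinks).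
def bTrial (m d ans : Int) : Int × Int × Int :=
  if h : d * d ≤ m ∧ 2 ≤ d then
    if hmod : PySem.Int.mod m d = 0 then bTrial (PySem.Int.floordiv m d) d (ans + 1)
    else bTrial m (d + 1) ans
  else (m, d, ans)
termination_by (m.toNat, (m - d * d).toNat)
decreasing_by
  · obtain ⟨hdd, hd2⟩ := h
    have h4 : (4:Int) ≤ m := by nlinarith
    have hfl : PySem.Int.floordiv m d = m / d := PySem.Int.floordiv_eq_ediv_of_pos (by omega)
    apply Prod.Lex.left
    have h1 : m / d < m := Int.ediv_lt_self_of_pos_of_ne_one (by omega) (by omega)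
    rw [hfl]; omega
  · obtain ⟨hdd, hd2⟩ := h
    have hndvd : ¬ d ∣ m := by
      intro hc; exact hmod ((PySem.Int.mod_eq_zero_iff_dvd m d).mpr hc)
    have hne : d * d ≠ m := by intro hc; exact hndvd ⟨d, hc.symm⟩
    have hstep : d * d < (d + 1) * (d + 1) := by nlinarith
    apply Prod.Lex.right
    omega

def Count_PrimeNum_alt (N : Int) : Int :=
  (PySem.List.pyRange 2 (N + 1) 1).foldl
    (fun ans i =>
      let r := bTrial i 2 ans
      if 1 < r.1 then r.2.2 + 1 else r.2.2)
    0

-- ===== PRECONDITION & SPEC =====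
-- Pre_ excludes exactly N ≥ 100005, where A overruns its fixed 100005-entry arrays
-- and raises IndexError (it admits every input on which A returns).
def Pre_Count_PrimeNum (N : Int) : Prop := N ≤ 100004
instance (N : Int) : Decidable (Pre_Count_PrimeNum N) := by unfold Pre_Count_PrimeNum; infer_instance
def pvWitness_Count_PrimeNum : Int := 30

def Spec_Count_PrimeNum (N : Int) (out : Int) : Prop := out = Count_PrimeNum_alt N
instance (N : Int) (out : Int) : Decidable (Spec_Count_PrimeNum N out) := by unfold Spec_Count_PrimeNum; infer_instance

-- ===== CLAIM (what is proved, stated in full; the proofs are below) =====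
def Claim_equal_Count_PrimeNum : Prop := ∀ (N : Int), Dom_Count_PrimeNum N → Pre_Count_PrimeNum N → Spec_Count_PrimeNum N (Count_PrimeNum N)

-- ===== LEMMAS AND PROOFS =====
-- Both programs are shown equal to ASum N = Σ_(i=2..N) Ω(i),
-- Ω = number of prime factors with multiplicity.

def OmegaZ (n : Nat) : Int := (n.primeFactorsList.length : Int)

theorem OmegaZ_prime {p : Nat} (hp : p.Prime) : OmegaZ p = 1 := by
  simp [OmegaZ, Nat.primeFactorsList_prime hp]

theorem OmegaZ_mul {a b : Nat} (ha : a ≠ 0) (hb : b ≠ 0) :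
    OmegaZ (a * b) = OmegaZ a + OmegaZ b := by
  have := (Nat.perm_primeFactorsList_mul ha hb).length_eq
  simp [OmegaZ, this]

theorem prime_of_no_small_divisor {m d : Nat} (hm : 2 ≤ m) (hlt : m < d * d)
    (hnd : ∀ e, 2 ≤ e → e < d → ¬ e ∣ m) : m.Prime := by
  by_contra hnp
  have h1 : m ≠ 1 := by omega
  have hmf2 : 2 ≤ m.minFac := (Nat.minFac_prime h1).two_le
  have hsq : m.minFac * m.minFac ≤ m := by
    calc m.minFac * m.minFac ≤ (m / m.minFac) * m.minFac :=
          Nat.mul_le_mul_right _ (Nat.minFac_le_div (by omega) hnp)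
      _ ≤ m := Nat.div_mul_le_self _ _
  have hlt' : m.minFac < d := by nlinarith
  exact hnd _ hmf2 hlt' (Nat.minFac_dvd m)

theorem prime_of_min_divisor {m d : Nat} (_hm : 2 ≤ m) (hd : 2 ≤ d) (hdvd : d ∣ m)
    (hnd : ∀ e, 2 ≤ e → e < d → ¬ e ∣ m) : d.Prime := by
  refine Nat.prime_def_lt.mpr ⟨hd, fun e helt hedvd => ?_⟩
  by_contra he1
  have he2 : 2 ≤ e := by
    rcases Nat.eq_zero_or_pos e with h0 | h0
    · subst h0; rw [Nat.zero_dvd] at hedvd; omega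
    · omega
  exact hnd e he2 helt (hedvd.trans hdvd)

-- ---------- B side ----------

theorem bTrial_eq (m d ans : Int) (hm : 1 ≤ m) (hd : 2 ≤ d)
    (hnd : ∀ e : Int, 2 ≤ e → e < d → ¬ e ∣ m) :
    (if 1 < (bTrial m d ans).1 then (bTrial m d ans).2.2 + 1 else (bTrial m d ans).2.2)
      = ans + OmegaZ m.toNat := by
  induction m, d, ans using bTrial.induct with
  | case1 m d ans h hmod ih =>
    obtain ⟨hdd, hd2⟩ := h
    have h4 : (4:Int) ≤ m := by nlinarith
    have hfl : PySem.Int.floordiv m d = m / d := PySem.Int.floordiv_eq_ediv_of_pos (by omega)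
    have hdvd : d ∣ m := (PySem.Int.mod_eq_zero_iff_dvd m d).mp hmod
    -- Nat versions
    have hMm : ((m.toNat : Int)) = m := Int.toNat_of_nonneg (by omega)
    have hDd : ((d.toNat : Int)) = d := Int.toNat_of_nonneg (by omega)
    have hdvdN : d.toNat ∣ m.toNat := by
      apply Int.natCast_dvd_natCast.mp
      rw [hMm, hDd]; exact hdvd
    have hndN : ∀ e : Nat, 2 ≤ e → e < d.toNat → ¬ e ∣ m.toNat := by
      intro e he2 helt hedvd
      have hcast : (e:Int) ∣ ((m.toNat : Nat) : Int) := Int.natCast_dvd_natCast.mpr hedvd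
      rw [hMm] at hcast
      exact hnd (e : Int) (by omega) (by omega) hcast
    have hDp : d.toNat.Prime := prime_of_min_divisor (by omega) (by omega) hdvdN hndN
    have hq : m / d = ((m.toNat / d.toNat : Nat) : Int) := by
      rw [Int.natCast_ediv, hMm, hDd]
    have hddm : d ≤ m := by nlinarith
    have hq1 : 1 ≤ m.toNat / d.toNat := Nat.one_le_div_iff (by omega) |>.mpr (by omega)
    have hsplit : m.toNat = d.toNat * (m.toNat / d.toNat) := (Nat.mul_div_cancel' hdvdN).symm
    have hOm : OmegaZ m.toNat = 1 + OmegaZ (m.toNat / d.toNat) := by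
      calc OmegaZ m.toNat = OmegaZ (d.toNat * (m.toNat / d.toNat)) := by rw [← hsplit]
        _ = OmegaZ d.toNat + OmegaZ (m.toNat / d.toNat) := OmegaZ_mul (by omega) (by omega)
        _ = 1 + OmegaZ (m.toNat / d.toNat) := by rw [OmegaZ_prime hDp]
    rw [bTrial, dif_pos ⟨hdd, hd2⟩, dif_pos hmod]
    rw [ih (by rw [hfl, hq]; omega) (by omega) ?side]
    · rw [hfl, hq]
      rw [Int.toNat_natCast]
      rw [hOm]; ring
    case side =>
      intro e he2 helt hedvd
      refine hnd e he2 helt (hedvd.trans ?_)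
      rw [hfl]
      exact ⟨d, (Int.ediv_mul_cancel hdvd).symm⟩
  | case2 m d ans h hmod ih =>
    obtain ⟨hdd, hd2⟩ := h
    rw [bTrial, dif_pos ⟨hdd, hd2⟩, dif_neg hmod]
    refine ih (by omega) (by omega) ?_
    intro e he2 helt hedvd
    by_cases hed : e = d
    · subst hed
      exact hmod ((PySem.Int.mod_eq_zero_iff_dvd m e).mpr hedvd)
    · exact hnd e he2 (by omega) hedvd
  | case3 m d ans h =>
    rw [bTrial, dif_neg h]
    simp only
    by_cases hm1 : 1 < m
    · have hmlt : m < d * d := by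
        by_contra hc; exact h ⟨by omega, hd⟩
      have hMm : ((m.toNat : Int)) = m := Int.toNat_of_nonneg (by omega)
      have hDd : ((d.toNat : Int)) = d := Int.toNat_of_nonneg (by omega)
      have hcast : ((d.toNat * d.toNat : Nat) : Int) = d * d := by push_cast [hDd]; ring
      have hMp : m.toNat.Prime := by
        apply prime_of_no_small_divisor (d := d.toNat) (by omega) (by omega)
        intro e he2 helt hedvd
        have hc : (e:Int) ∣ ((m.toNat : Nat) : Int) := Int.natCast_dvd_natCast.mpr hedvd
        rw [hMm] at hc
        exact hnd (e : Int) (by omega) (by omega) hc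
      rw [if_pos hm1, OmegaZ_prime hMp]
    · have hm1' : m = 1 := by omega
      rw [if_neg hm1]
      subst hm1'
      simp [OmegaZ]

theorem foldB (L : List Int) (a : Int) (hL : ∀ i ∈ L, 2 ≤ i) :
    L.foldl
      (fun ans i =>
        let r := bTrial i 2 ans
        if 1 < r.1 then r.2.2 + 1 else r.2.2) a
      = a + (L.map (fun i => OmegaZ i.toNat)).sum := by
  induction L generalizing a with
  | nil => simp
  | cons x xs ih =>
    have hx : 2 ≤ x := hL x (by simp)
    simp only [List.foldl_cons, List.map_cons, List.sum_cons]
    rw [ih _ (fun i hi => hL i (by simp [hi]))]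
    rw [bTrial_eq x 2 a (by omega) (by omega) (by intro e he1 he2; omega)]
    ring

-- ---------- A side ----------

theorem getD_set {α : Type} (xs : Array α) (i j : Nat) (v d : α) :
    (xs.setIfInBounds i v).getD j d = if i = j ∧ i < xs.size then v else xs.getD j d := by
  rw [Array.getD_eq_getD_getElem?, Array.getD_eq_getD_getElem?, Array.getElem?_setIfInBounds]
  by_cases hij : i = j
  · subst hij
    by_cases hlen : i < xs.size
    · simp [hlen]
    · simp [hlen]
  · simp [hij]

theorem getD_replicate {α : Type} (n i : Nat) (a d : α) :
    (Array.replicate n a).getD i d = if i < n then a else d := by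
  rw [Array.getD_eq_getD_getElem?, Array.getElem?_replicate]
  split <;> rfl

theorem getD_irrel {α : Type} (xs : Array α) (idx : Nat) (a b : α) (h : idx < xs.size) :
    xs.getD idx a = xs.getD idx b := by
  rw [Array.getD_eq_getD_getElem?, Array.getD_eq_getD_getElem?, Array.getElem?_eq_getElem h]
  rfl

theorem prime_entry {N m : Int} {prime : Array Int}
    (hI3 : ∀ idx : Nat, (idx < 2 ∨ idx.Prime) → prime.getD idx 1 = 1)
    (hI2 : ∀ idx : Nat, 2 ≤ idx → ¬ idx.Prime → (idx : Int) ≤ N →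
      ((idx / idx.minFac : Nat) : Int) ≤ m → prime.getD idx 1 = OmegaZ idx)
    (i : Int) (hi2 : 2 ≤ i) (hiN : i ≤ N) (him : i ≤ m + 1) :
    prime.getD i.toNat 1 = OmegaZ i.toNat := by
  by_cases hp : i.toNat.Prime
  · rw [hI3 i.toNat (Or.inr hp), OmegaZ_prime hp]
  · have h2 : 2 ≤ i.toNat := by omega
    have hdiv : i.toNat / i.toNat.minFac ≤ i.toNat / 2 :=
      Nat.div_le_div_left ((Nat.minFac_prime (by omega)).two_le) (by omega)
    refine hI2 i.toNat h2 hp (by omega) ?_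
    have : i.toNat / 2 ≤ i.toNat - 1 := by omega
    omega

theorem innerFold
    (N i k : Int) (prime0 : Array Int)
    (hi2 : 2 ≤ i) (hiN : i ≤ N) (hN : N ≤ 100004)
    (hki : k ≤ i) (hkN : k ≤ PySem.Int.floordiv N i)
    (hp0i : prime0.getD i.toNat 1 = OmegaZ i.toNat)
    (hp0j : ∀ j : Int, 2 ≤ j → j ≤ k → prime0.getD j.toNat 1 = OmegaZ j.toNat) :
    ∀ (js : List Int) (vis : Array Bool) (prime : Array Int),
      (∀ j ∈ js, 2 ≤ j ∧ j ≤ k) →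
      vis.size = 100005 → prime.size = 100005 →
      (∀ idx : Nat, idx ≤ i.toNat → prime.getD idx 1 = prime0.getD idx 1) →
      (∀ idx : Nat, vis.getD idx false = true → prime.getD idx 1 = OmegaZ idx) →
      (∀ idx : Nat, (idx < 2 ∨ idx.Prime) → prime.getD idx 1 = 1) →
      (js.foldl (aInner i) (vis, prime)).1.size = 100005 ∧
      (js.foldl (aInner i) (vis, prime)).2.size = 100005 ∧
      (∀ idx : Nat, idx ≤ i.toNat →
        (js.foldl (aInner i) (vis, prime)).2.getD idx 1 = prime0.getD idx 1) ∧
      (∀ idx : Nat, (js.foldl (aInner i) (vis, prime)).1.getD idx false = true →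
        (js.foldl (aInner i) (vis, prime)).2.getD idx 1 = OmegaZ idx) ∧
      (∀ idx : Nat, (idx < 2 ∨ idx.Prime) →
        (js.foldl (aInner i) (vis, prime)).2.getD idx 1 = 1) ∧
      (∀ idx : Nat, prime.getD idx 1 = OmegaZ idx →
        (js.foldl (aInner i) (vis, prime)).2.getD idx 1 = OmegaZ idx) ∧
      (∀ j ∈ js, (js.foldl (aInner i) (vis, prime)).2.getD (i * j).toNat 1
        = OmegaZ (i * j).toNat) := by
  intro js
  induction js with
  | nil =>
    intro vis prime _ hv hp hlow hI1 hI3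
    exact ⟨hv, hp, hlow, hI1, hI3, fun _ h => h, by simp⟩
  | cons j js ih =>
    intro vis prime hjs hv hp hlow hI1 hI3
    obtain ⟨hj2, hjk⟩ := hjs j (by simp)
    have hij : j * i ≤ N := (PySem.Int.le_floordiv_iff_mul_le (by omega)).mp (le_trans hjk hkN)
    have htN : i * j ≤ N := by rw [mul_comm]; exact hij
    have ht4 : 4 ≤ i * j := by nlinarith
    have ht0 : (0:Int) ≤ i * j := by omega
    have htnat : (i * j).toNat = i.toNat * j.toNat := by
      have hc : ((i.toNat * j.toNat : Nat) : Int) = i * j := by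
        push_cast
        rw [Int.toNat_of_nonneg (by omega), Int.toNat_of_nonneg (by omega)]
      omega
    have hiton : 2 ≤ i.toNat := by omega
    have hjton : 2 ≤ j.toNat := by omega
    have htlt : (i * j).toNat < 100005 := by omega
    have htbig : i.toNat < (i * j).toNat := by
      have : i.toNat * 2 ≤ i.toNat * j.toNat := Nat.mul_le_mul_left _ hjton
      omega
    simp only [List.foldl_cons]
    by_cases hvis : vis.getD (i * j).toNat false = true
    · -- vis[i*j] already true: skip
      have hstep : aInner i (vis, prime) j = (vis, prime) := by
        simp only [aInner]
        rw [if_pos hvis]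
      rw [hstep]
      have hΩt : prime.getD (i * j).toNat 1 = OmegaZ (i * j).toNat := hI1 _ hvis
      obtain ⟨c1, c2, c3, c4, c5, c6, c7⟩ :=
        ih vis prime (fun x hx => hjs x (by simp [hx])) hv hp hlow hI1 hI3
      refine ⟨c1, c2, c3, c4, c5, c6, ?_⟩
      intro x hx
      rcases List.mem_cons.mp hx with rfl | hx'
      · exact c6 _ hΩt
      · exact c7 x hx'
    · -- write vis[i*j] := True, prime[i*j] := prime[i] + prime[j]
      have hstep : aInner i (vis, prime) j =
          (vis.setIfInBounds (i * j).toNat true,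
           prime.setIfInBounds (i * j).toNat (prime.getD i.toNat 0 + prime.getD j.toNat 0)) := by
        simp only [aInner]
        rw [if_neg hvis]
      have hd0i : prime.getD i.toNat 0 = prime.getD i.toNat 1 := getD_irrel _ _ _ _ (by omega)
      have hd0j : prime.getD j.toNat 0 = prime.getD j.toNat 1 := getD_irrel _ _ _ _ (by omega)
      have hwi : prime.getD i.toNat 1 = OmegaZ i.toNat := by
        rw [hlow i.toNat le_rfl]; exact hp0i
      have hwj : prime.getD j.toNat 1 = OmegaZ j.toNat := by
        rw [hlow j.toNat (by omega)]; exact hp0j j hj2 hjk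
      have hwt : prime.getD i.toNat 0 + prime.getD j.toNat 0 = OmegaZ (i * j).toNat := by
        rw [hd0i, hd0j, hwi, hwj, htnat, OmegaZ_mul (by omega) (by omega)]
      rw [hstep]
      have hv1 : (vis.setIfInBounds (i * j).toNat true).size = 100005 := by simp [hv]
      have hp1 : (prime.setIfInBounds (i * j).toNat (prime.getD i.toNat 0 + prime.getD j.toNat 0)).size = 100005 := by
        simp [hp]
      have hlow1 : ∀ idx : Nat, idx ≤ i.toNat →
          (prime.setIfInBounds (i * j).toNat (prime.getD i.toNat 0 + prime.getD j.toNat 0)).getD idx 1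
            = prime0.getD idx 1 := by
        intro idx hidx
        rw [getD_set, if_neg (by rintro ⟨rfl, -⟩; omega)]
        exact hlow idx hidx
      have hI1' : ∀ idx : Nat, (vis.setIfInBounds (i * j).toNat true).getD idx false = true →
          (prime.setIfInBounds (i * j).toNat (prime.getD i.toNat 0 + prime.getD j.toNat 0)).getD idx 1
            = OmegaZ idx := by
        intro idx hvt
        by_cases he : (i * j).toNat = idx
        · subst he
          rw [getD_set, if_pos ⟨rfl, by omega⟩]
          exact hwt
        · rw [getD_set, if_neg (by rintro ⟨rfl, -⟩; exact he rfl)]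
          apply hI1
          rw [getD_set, if_neg (by rintro ⟨rfl, -⟩; exact he rfl)] at hvt
          exact hvt
      have hI3' : ∀ idx : Nat, (idx < 2 ∨ idx.Prime) →
          (prime.setIfInBounds (i * j).toNat (prime.getD i.toNat 0 + prime.getD j.toNat 0)).getD idx 1
            = 1 := by
        intro idx hcase
        by_cases he : (i * j).toNat = idx
        · exfalso
          rcases hcase with hlt2 | hpr
          · omega
          · rw [← he, htnat] at hpr
            exact Nat.not_prime_mul (by omega) (by omega) hpr
        · rw [getD_set, if_neg (by rintro ⟨rfl, -⟩; exact he rfl)]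
          exact hI3 idx hcase
      have hmono : ∀ idx : Nat, prime.getD idx 1 = OmegaZ idx →
          (prime.setIfInBounds (i * j).toNat (prime.getD i.toNat 0 + prime.getD j.toNat 0)).getD idx 1
            = OmegaZ idx := by
        intro idx h
        by_cases he : (i * j).toNat = idx
        · subst he
          rw [getD_set, if_pos ⟨rfl, by omega⟩]
          exact hwt
        · rw [getD_set, if_neg (by rintro ⟨rfl, -⟩; exact he rfl)]
          exact h
      obtain ⟨c1, c2, c3, c4, c5, c6, c7⟩ :=
        ih _ _ (fun x hx => hjs x (by simp [hx])) hv1 hp1 hlow1 hI1' hI3'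
      refine ⟨c1, c2, c3, c4, c5, ?_, ?_⟩
      · intro idx h
        exact c6 idx (hmono idx h)
      · intro x hx
        rcases List.mem_cons.mp hx with rfl | hx'
        · refine c6 _ ?_
          rw [getD_set, if_pos ⟨rfl, by omega⟩]
          exact hwt
        · exact c7 x hx'

def AInv (N m : Int) (vis : Array Bool) (prime : Array Int) : Prop :=
  vis.size = 100005 ∧ prime.size = 100005 ∧
  (∀ idx : Nat, vis.getD idx false = true → prime.getD idx 1 = OmegaZ idx) ∧
  (∀ idx : Nat, (idx < 2 ∨ idx.Prime) → prime.getD idx 1 = 1) ∧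
  (∀ idx : Nat, 2 ≤ idx → ¬ idx.Prime → (idx : Int) ≤ N →
    ((idx / idx.minFac : Nat) : Int) ≤ m → prime.getD idx 1 = OmegaZ idx)

def ASum (m : Int) : Int := ((PySem.List.pyRange 2 (m + 1) 1).map (fun i => OmegaZ i.toNat)).sum

theorem outerStep (N m ans : Int) (vis : Array Bool) (prime : Array Int)
    (hm1 : 1 ≤ m) (hmN : m + 1 ≤ N) (hN : N ≤ 100004)
    (hinv : AInv N m vis prime) :
    (aOuter N (ans, vis, prime) (m + 1)).1 = ans + OmegaZ (m + 1).toNat ∧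
    AInv N (m + 1) (aOuter N (ans, vis, prime) (m + 1)).2.1
      (aOuter N (ans, vis, prime) (m + 1)).2.2 := by
  obtain ⟨hv, hp, hI1, hI3, hI2⟩ := hinv
  have hi2 : (2:Int) ≤ m + 1 := by omega
  have hpi : prime.getD (m + 1).toNat 1 = OmegaZ (m + 1).toNat :=
    prime_entry hI3 hI2 (m + 1) hi2 (by omega) (by omega)
  set i : Int := m + 1 with hi
  set k : Int := min (PySem.Int.floordiv N i) i with hk
  have hki : k ≤ i := min_le_right _ _
  have hkN : k ≤ PySem.Int.floordiv N i := min_le_left _ _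
  have hp0j : ∀ j : Int, 2 ≤ j → j ≤ k → prime.getD j.toNat 1 = OmegaZ j.toNat := by
    intro j h2 hjk
    exact prime_entry hI3 hI2 j h2 (by omega) (by omega)
  obtain ⟨c1, c2, c3, c4, c5, c6, c7⟩ :=
    innerFold N i k prime hi2 (by omega) hN hki hkN hpi hp0j
      (PySem.List.pyRange 2 (k + 1) 1) vis prime
      (fun j hj => by have := PySem.List.mem_pyRange_one.mp hj; exact ⟨this.1, by omega⟩)
      hv hp (fun idx _ => rfl) hI1 hI3
  have hread : prime.getD i.toNat 0 = OmegaZ i.toNat := by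
    rw [getD_irrel prime i.toNat 0 1 (by omega), hpi]
  constructor
  · simp only [aOuter, hread]
  · refine ⟨by simpa [aOuter] using c1, by simpa [aOuter] using c2, ?_, ?_, ?_⟩
    · simpa [aOuter] using c4
    · simpa [aOuter] using c5
    · intro idx h2 hnp hidxN hdivm
      have hne1 : idx ≠ 1 := by omega
      have hmfp : idx.minFac.Prime := Nat.minFac_prime hne1
      have hmf2 : 2 ≤ idx.minFac := hmfp.two_le
      have hdvd : idx.minFac ∣ idx := Nat.minFac_dvd idx
      have hle : idx.minFac ≤ idx / idx.minFac := Nat.minFac_le_div (by omega) hnp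
      simp only [aOuter]
      by_cases hcase : ((idx / idx.minFac : Nat) : Int) ≤ m
      · exact c6 idx (hI2 idx h2 hnp hidxN hcase)
      · have heq : ((idx / idx.minFac : Nat) : Int) = i := by omega
        have hsplit : idx = (idx / idx.minFac) * idx.minFac := (Nat.div_mul_cancel hdvd).symm
        have hcast : ((idx / idx.minFac * idx.minFac : Nat) : Int) = i * (idx.minFac : Int) := by
          rw [Nat.cast_mul, heq]
        have hiidx : i * (idx.minFac : Int) = (idx : Int) := by
          rw [← hcast]
          exact congrArg (fun n : Nat => (n : Int)) hsplit.symm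
        have hjmem : ((idx.minFac : Nat) : Int) ∈ PySem.List.pyRange 2 (k + 1) 1 := by
          apply PySem.List.mem_pyRange_one.mpr
          refine ⟨by exact_mod_cast hmf2, ?_⟩
          have hmfi : ((idx.minFac : Nat) : Int) ≤ i := by
            rw [← heq]
            exact_mod_cast hle
          have hmffl : ((idx.minFac : Nat) : Int) ≤ PySem.Int.floordiv N i := by
            rw [PySem.Int.le_floordiv_iff_mul_le (by omega)]
            rw [mul_comm, hiidx]
            exact hidxN
          have : ((idx.minFac : Nat) : Int) ≤ k := le_min hmffl hmfi
          omega
        have := c7 _ hjmem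
        rwa [show (i * ((idx.minFac : Nat) : Int)).toNat = idx by rw [hiidx]; omega] at this

theorem outerFold (N : Int) (hN : N ≤ 100004) (m : Int) (h1 : 1 ≤ m) (hmN : m ≤ N) :
    ((PySem.List.pyRange 2 (m + 1) 1).foldl (aOuter N)
        (0, Array.replicate 100005 false, Array.replicate 100005 (1:Int))).1 = ASum m ∧
    AInv N m ((PySem.List.pyRange 2 (m + 1) 1).foldl (aOuter N)
        (0, Array.replicate 100005 false, Array.replicate 100005 (1:Int))).2.1
      ((PySem.List.pyRange 2 (m + 1) 1).foldl (aOuter N)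
        (0, Array.replicate 100005 false, Array.replicate 100005 (1:Int))).2.2 := by
  have key : ∀ n : Nat, 1 + (n : Int) ≤ N →
      ((PySem.List.pyRange 2 (1 + (n : Int) + 1) 1).foldl (aOuter N)
          (0, Array.replicate 100005 false, Array.replicate 100005 (1:Int))).1 = ASum (1 + n) ∧
      AInv N (1 + n) ((PySem.List.pyRange 2 (1 + (n : Int) + 1) 1).foldl (aOuter N)
          (0, Array.replicate 100005 false, Array.replicate 100005 (1:Int))).2.1
        ((PySem.List.pyRange 2 (1 + (n : Int) + 1) 1).foldl (aOuter N)
          (0, Array.replicate 100005 false, Array.replicate 100005 (1:Int))).2.2 := by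
    intro n
    induction n with
    | zero =>
      intro _
      rw [show ((1:Int) + ((0:Nat):Int) + 1) = 2 by norm_num, PySem.List.pyRange_one_eq_nil le_rfl,
          List.foldl_nil]
      refine ⟨?_, ?_, ?_, ?_, ?_, ?_⟩
      · show (0:Int) = ASum 1
        rw [ASum, PySem.List.pyRange_one_eq_nil (by norm_num)]
        rfl
      · exact Array.size_replicate
      · exact Array.size_replicate
      · intro idx h
        rw [getD_replicate] at h
        by_cases hlt : idx < 100005 <;> simp [hlt] at h
      · intro idx _
        show (Array.replicate 100005 (1:Int)).getD idx 1 = 1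
        rw [getD_replicate]
        split <;> rfl
      · intro idx h2 hnp _ hdivm
        have hle : idx.minFac ≤ idx / idx.minFac := Nat.minFac_le_div (by omega) hnp
        have hmf2 : 2 ≤ idx.minFac := (Nat.minFac_prime (by omega)).two_le
        have hge : (2:Int) ≤ ((idx / idx.minFac : Nat) : Int) := by exact_mod_cast by omega
        norm_num at hdivm
        omega
    | succ n ih =>
      intro hn
      have hpush : ((n + 1 : Nat) : Int) = (n : Int) + 1 := by push_cast; ring
      rw [hpush]
      have hsplitr : PySem.List.pyRange 2 (1 + ((n : Int) + 1) + 1) 1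
          = PySem.List.pyRange 2 (1 + (n : Int) + 1) 1 ++ [1 + (n : Int) + 1] := by
        rw [show (1 + ((n : Int) + 1) + 1) = (1 + (n : Int) + 1) + 1 by ring]
        rw [PySem.List.pyRange_one_succ_right (by omega)]
      have hASum : ASum ((1 + (n:Int)) + 1) = ASum (1 + (n:Int)) + OmegaZ ((1 + (n:Int)) + 1).toNat := by
        rw [ASum, ASum, show ((1 + (n:Int)) + 1 + 1) = (1 + (n:Int) + 1) + 1 by ring,
            PySem.List.pyRange_one_succ_right (by omega), List.map_append, List.sum_append]
        simp
      obtain ⟨ih1, ihinv⟩ := ih (by omega)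
      rw [hsplitr, List.foldl_append, List.foldl_cons, List.foldl_nil]
      have hstep := outerStep N (1 + (n:Int))
        ((PySem.List.pyRange 2 (1 + (n : Int) + 1) 1).foldl (aOuter N)
          (0, Array.replicate 100005 false, Array.replicate 100005 (1:Int))).1
        ((PySem.List.pyRange 2 (1 + (n : Int) + 1) 1).foldl (aOuter N)
          (0, Array.replicate 100005 false, Array.replicate 100005 (1:Int))).2.1
        ((PySem.List.pyRange 2 (1 + (n : Int) + 1) 1).foldl (aOuter N)
          (0, Array.replicate 100005 false, Array.replicate 100005 (1:Int))).2.2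
        (by omega) (by omega) hN ihinv
      refine ⟨?_, ?_⟩
      · rw [show (1 + ((n:Int) + 1)) = (1 + (n:Int)) + 1 by ring]
        exact hstep.1.trans (by rw [ih1, hASum])
      · rw [show (1 + ((n:Int) + 1)) = (1 + (n:Int)) + 1 by ring]
        exact hstep.2
  have hm : m = 1 + ((m - 1).toNat : Int) := by omega
  rw [hm]
  exact key (m - 1).toNat (by omega)

theorem A_eq_sum (N : Int) (hN : N ≤ 100004) : Count_PrimeNum N = ASum N := by
  by_cases h2 : N < 2
  · simp only [Count_PrimeNum]
    rw [PySem.List.pyRange_one_eq_nil (by omega), List.foldl_nil, ASum,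
        PySem.List.pyRange_one_eq_nil (by omega)]
    rfl
  · simp only [Count_PrimeNum]
    exact (outerFold N hN N (by omega) le_rfl).1

theorem B_eq_sum (N : Int) : Count_PrimeNum_alt N = ASum N := by
  unfold Count_PrimeNum_alt
  rw [foldB _ _ (fun i hi => (PySem.List.mem_pyRange_one.mp hi).1)]
  simp [ASum]

-- ===== VERDICT (by name: the statement is the Claim_ definition above) =====
theorem Count_PrimeNum_spec : Claim_equal_Count_PrimeNum := by
  intro N _ hPre
  unfold Spec_Count_PrimeNum
  rw [A_eq_sum N hPre, B_eq_sum N]
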